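-- pv_equiv track=rewrite | github.com/boojang/ktb-2-coding-test-study | Semi/12주차/[1]가장많이받은선물.py | get_gift_status
-- ===== SOURCE A (Python) =====
-- def get_gift_status(friends,gifts):
--     n = len(friends)
--
--     # i 행의 합 : i번 사람이 남에게 준 선물 수
--     # i 열의 합 : i번 사람이 남에게 받은 선물 수
--     gift_status = [[0]*n for _ in range(n)]
--
--     #이름 -> 인덱스 매핑
--     name_index = {name : idx for idx, name in enumerate(friends)}
--
--     # 선물 현황 추가
--     for record in gifts:
--         #a :준사람  b:받은 사람
--         giver,receiver = record.split()
--         giver_idx = name_index[giver]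
--         receiver_idx = name_index[receiver]
--
--         gift_status[giver_idx][receiver_idx] +=1
--
--     return gift_status
-- ===== SOURCE B (Python) =====
-- def get_gift_status(friends, gifts):
--     # Resolve each record once into an index pair, then fill each matrix cell by
--     # directly counting the matching pairs: no dict, no in-place incrementing.
--     pairs = []
--     for record in gifts:
--         giver, receiver = record.split()
--         pairs.append((friends.index(giver), friends.index(receiver)))
--     n = len(friends)
--     return [[pairs.count((i, j)) for j in range(n)] for i in range(n)]
-- ===== Notes on version B (the rewrite author's own statement) =====
-- stated objective: alternative
-- what changed: B drops the name-to-index dict and the in-place matrix incrementing: it resolves each record once into a (giver_index, receiver_index) pair via list.index, then fills each matrix cell by directly counting the matching pairs with list.count, a per-cell counting scan instead of A's indexed accumulation; it trades A's O(1) dict lookups and cell increments for index/count scans.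
-- outside the precondition, e.g. on get_gift_status(['a', 'a'], ['a a']): A returns [[0, 0], [0, 1]], B returns [[1, 0], [0, 0]]
import Mathlib
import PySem

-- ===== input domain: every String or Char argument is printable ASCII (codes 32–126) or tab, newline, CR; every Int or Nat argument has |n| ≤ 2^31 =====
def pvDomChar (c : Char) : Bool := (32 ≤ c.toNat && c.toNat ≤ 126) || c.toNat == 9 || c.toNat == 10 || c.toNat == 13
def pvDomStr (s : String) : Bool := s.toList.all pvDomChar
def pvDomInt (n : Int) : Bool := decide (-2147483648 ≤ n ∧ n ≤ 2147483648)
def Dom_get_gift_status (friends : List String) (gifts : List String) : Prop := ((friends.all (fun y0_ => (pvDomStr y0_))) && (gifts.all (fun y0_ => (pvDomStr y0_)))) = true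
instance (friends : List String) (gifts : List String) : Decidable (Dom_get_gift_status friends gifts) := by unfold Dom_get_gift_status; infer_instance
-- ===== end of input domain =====

-- B drops the name->index dict and in-place matrix incrementing: it resolves each record
-- once into an index pair via list.index, then fills each matrix cell by directly counting
-- the matching pairs with list.count (objective: alternative; not faster).

-- ===== PORT A =====
-- name_index = {name: idx for idx, name in enumerate(friends)}
def pvNameIndex (friends : List String) : PySem.Dict String Int :=
  (PySem.List.enumerate friends 0).foldl (fun d p => d.insert p.2 p.1) PySem.Dict.empty

-- one iteration of A's loop; Option threads Python's exceptions (none = raise)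
def pvStepA (d : PySem.Dict String Int) (om : Option (List (List Int))) (record : String) :
    Option (List (List Int)) :=
  om.bind fun m =>
    match PySem.Str.split₀ record with
    | [giver, receiver] =>
      (d.get? giver).bind fun gi =>
      (d.get? receiver).bind fun ri =>
      (PySem.List.pyGet? m gi).bind fun row =>
      (PySem.List.pyGet? row ri).bind fun v =>
      (PySem.List.pySet? row ri (v + 1)).bind fun row' =>
      PySem.List.pySet? m gi row'
    | _ => none   -- 'giver, receiver = record.split()' raises unless exactly two tokens

def get_gift_status (friends : List String) (gifts : List String) : List (List Int) :=
  let n := friends.length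
  let giftStatus : List (List Int) := (List.range n).map (fun _ => List.replicate n (0 : Int))
  let nameIndex := pvNameIndex friends
  (gifts.foldl (pvStepA nameIndex) (some giftStatus)).getD []

-- ===== PORT B =====
-- one iteration of B's pair-building loop; Option threads Python's exceptions (none = raise)
def pvStepB (friends : List String) (op : Option (List (Int × Int))) (record : String) :
    Option (List (Int × Int)) :=
  op.bind fun ps =>
    match PySem.Str.split₀ record with
    | [giver, receiver] =>
      (PySem.List.index? friends giver).bind fun gi =>
      (PySem.List.index? friends receiver).bind fun ri =>
      some (ps ++ [((gi : Int), (ri : Int))])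
    | _ => none   -- 'giver, receiver = record.split()' raises unless exactly two tokens

def get_gift_status_alt (friends : List String) (gifts : List String) : List (List Int) :=
  match gifts.foldl (pvStepB friends) (some []) with
  | some pairs =>
    let n := friends.length
    (PySem.List.pyRange 0 n 1).map (fun i =>
      (PySem.List.pyRange 0 n 1).map (fun j => (pairs.count (i, j) : Int)))
  | none => []

-- ===== PRECONDITION & SPEC =====
-- Pre_ excludes (a) the inputs where A raises — a record that does not split into exactly
-- two tokens (ValueError) or names a non-friend (KeyError) — and (b) records naming a friend
-- listed more than once, a defensible first-vs-last duplicate-keys corner: A's dict keeps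
-- the LAST index of a duplicated name while B's list.index resolves to the FIRST.
def Pre_get_gift_status (friends : List String) (gifts : List String) : Prop :=
  (gifts.all (fun record =>
    match PySem.Str.split₀ record with
    | [g, r] => friends.contains g && friends.contains r
    | _ => false)) = true ∧
  (gifts.any (fun record =>
    match PySem.Str.split₀ record with
    | [g, r] => 2 ≤ friends.count g || 2 ≤ friends.count r
    | _ => false)) = false
instance (friends : List String) (gifts : List String) : Decidable (Pre_get_gift_status friends gifts) := by unfold Pre_get_gift_status; infer_instance

def pvWitness_get_gift_status : List String × List String := (["a", "b"], ["a b", "b a", "a b"])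

def Spec_get_gift_status (friends : List String) (gifts : List String) (out : List (List Int)) : Prop := out = get_gift_status_alt friends gifts
instance (friends : List String) (gifts : List String) (out : List (List Int)) : Decidable (Spec_get_gift_status friends gifts out) := by unfold Spec_get_gift_status; infer_instance

-- ===== CLAIM (what is proved, stated in full; the proofs are below) =====
def Claim_equal_get_gift_status : Prop := ∀ (friends : List String) (gifts : List String), Dom_get_gift_status friends gifts → Pre_get_gift_status friends gifts → Spec_get_gift_status friends gifts (get_gift_status friends gifts)

-- ===== LEMMAS AND PROOFS =====

-- read a matrix cell through nested getD
theorem pvGetD2 (m : List (List Int)) (i j : Nat) (h1 : i < m.length) (h2 : j < m[i].length) :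
    (m.getD i []).getD j 0 = m[i][j] := by
  have hmi : m.getD i [] = m[i] := by
    rw [List.getD_eq_getElem?_getD, List.getElem?_eq_getElem h1, Option.getD_some]
  rw [hmi, List.getD_eq_getElem?_getD, List.getElem?_eq_getElem h2, Option.getD_some]

-- the name_index fold leaves keys not in the list untouched
theorem pvIndexFold_notMem : ∀ (l : List String) (s : Int) (d0 : PySem.Dict String Int)
    (k : String), k ∉ l →
    ((PySem.List.enumerate l s).foldl (fun d p => d.insert p.2 p.1) d0).get? k = d0.get? k := by
  intro l
  induction l with
  | nil => intro s d0 k _; simp [PySem.List.enumerate_nil]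
  | cons x xs ih =>
    intro s d0 k hk
    rw [PySem.List.enumerate_cons]
    simp only [List.foldl_cons]
    rw [ih (s+1) _ k (fun h => hk (List.mem_cons_of_mem _ h))]
    have hne : k ≠ x := fun h => hk (by rw [h]; exact List.mem_cons_self)
    rw [PySem.Dict.get?_insert_of_ne _ _ hne]

-- name_index maps a name that occurs exactly once to its (unique) index
theorem pvIndexFold_idxOf : ∀ (l : List String) (s : Int) (d0 : PySem.Dict String Int)
    (k : String), l.count k = 1 →
    ((PySem.List.enumerate l s).foldl (fun d p => d.insert p.2 p.1) d0).get? k =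
      some (s + l.idxOf k) := by
  intro l
  induction l with
  | nil => intro s d0 k hk; simp at hk
  | cons x xs ih =>
    intro s d0 k hc
    rw [PySem.List.enumerate_cons]
    simp only [List.foldl_cons]
    by_cases hkx : k = x
    · subst hkx
      have hzero : xs.count k = 0 := by
        rw [List.count_cons_self] at hc; omega
      have hnot : k ∉ xs := by
        intro hmem
        exact absurd hzero (by simpa [List.count_eq_zero] using hmem)
      rw [pvIndexFold_notMem xs (s+1) _ k hnot, PySem.Dict.get?_insert_self]
      simp [List.idxOf_cons_self]
    · have hcxs : xs.count k = 1 := by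
        simp only [List.count_cons] at hc
        rw [if_neg (fun h => hkx (eq_of_beq h).symm)] at hc
        omega
      rw [ih (s+1) _ k hcxs]
      have : (x :: xs).idxOf k = xs.idxOf k + 1 := by
        rw [List.idxOf_cons]
        simp [show (x == k) = false from beq_false_of_ne (fun h => hkx h.symm)]
      rw [this]
      congr 1
      push_cast
      ring

theorem pvNameIndex_idxOf (friends : List String) (k : String)
    (hk : friends.count k = 1) :
    (pvNameIndex friends).get? k = some ((friends.idxOf k : Nat) : Int) := by
  rw [pvNameIndex, pvIndexFold_idxOf friends 0 _ k hk]
  simp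

-- friends.index(k) on a member = its first index
theorem pvIndex?_idxOf : ∀ (l : List String) (k : String), k ∈ l →
    PySem.List.index? l k = some (l.idxOf k) := by
  intro l
  induction l with
  | nil => intro k hk; simp at hk
  | cons x xs ih =>
    intro k hk
    rw [PySem.List.index?_eq_idxOf?]
    by_cases hkx : k = x
    · subst hkx
      unfold List.idxOf?
      simp [List.findIdx?_cons, List.idxOf_cons_self]
    · have hkxs : k ∈ xs := by
        rcases List.mem_cons.mp hk with h | h
        · exact absurd h hkx
        · exact h
      have hxk : (x == k) = false := beq_false_of_ne (fun h => hkx h.symm)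
      have hrec : List.idxOf? k (x :: xs) = (List.idxOf? k xs).map (· + 1) := by
        unfold List.idxOf?
        rw [List.findIdx?_cons]
        simp [hxk]
      have hih := ih k hkxs
      rw [PySem.List.index?_eq_idxOf?] at hih
      rw [hrec, hih, List.idxOf_cons, hxk]
      rfl

-- invariant linking A's matrix with B's index-pair-prefix counts
def pvInv (friends : List String) (pairs : List (Int × Int)) (m : List (List Int)) : Prop :=
  m.length = friends.length ∧ (∀ row ∈ m, row.length = friends.length) ∧
  ∀ (i j : Nat) (hi : i < friends.length) (hj : j < friends.length),
    (m.getD i []).getD j 0 = (pairs.count ((i : Int), (j : Int)) : Int)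

theorem pvStep_inv (friends : List String)
    (record : String) (g r : String)
    (hs : PySem.Str.split₀ record = [g, r])
    (hg : friends.count g = 1) (hr : friends.count r = 1)
    (ps : List (Int × Int)) (m : List (List Int))
    (h : pvInv friends ps m) :
    ∃ m', pvStepA (pvNameIndex friends) (some m) record = some m' ∧
      pvStepB friends (some ps) record =
        some (ps ++ [((friends.idxOf g : Int), (friends.idxOf r : Int))]) ∧
      pvInv friends (ps ++ [((friends.idxOf g : Int), (friends.idxOf r : Int))]) m' := by
  obtain ⟨hlen, hrows, hpt⟩ := h
  have hgm : g ∈ friends := by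
    rw [← List.count_pos_iff]; omega
  have hrm : r ∈ friends := by
    rw [← List.count_pos_iff]; omega
  set a := friends.idxOf g with ha_def
  set b := friends.idxOf r with hb_def
  have han : a < friends.length := List.idxOf_lt_length_of_mem hgm
  have hbn : b < friends.length := List.idxOf_lt_length_of_mem hrm
  have hfa : friends[a] = g := List.getElem_idxOf han
  have hfb : friends[b] = r := List.getElem_idxOf hbn
  have ham : a < m.length := by omega
  have hrowlen : m[a].length = friends.length := hrows _ (List.getElem_mem ham)
  have hbm : b < m[a].length := by omega
  have e1 : PySem.List.pyGet? m ((a : Nat) : Int) = some m[a] := PySem.List.pyGet?_ofNat (h := ham)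
  have e2 : PySem.List.pyGet? m[a] ((b : Nat) : Int) = some m[a][b] := PySem.List.pyGet?_ofNat (h := hbm)
  have e3 : PySem.List.pySet? m[a] ((b : Nat) : Int) (m[a][b] + 1) = some (m[a].set b (m[a][b] + 1)) :=
    PySem.List.pySet?_natCast m[a] b (m[a][b] + 1) hbm
  have e4 : PySem.List.pySet? m ((a : Nat) : Int) (m[a].set b (m[a][b] + 1)) =
      some (m.set a (m[a].set b (m[a][b] + 1))) := PySem.List.pySet?_natCast m a (m[a].set b (m[a][b] + 1)) ham
  have g1 : m[a]? = some m[a] := List.getElem?_eq_getElem ham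
  have g2 : m[a][b]? = some m[a][b] := List.getElem?_eq_getElem hbm
  refine ⟨m.set a (m[a].set b (m[a][b] + 1)), ?_, ?_, ?_, ?_, ?_⟩
  · simp [pvStepA, hs, pvNameIndex_idxOf friends g hg, pvNameIndex_idxOf friends r hr,
      ← ha_def, ← hb_def, g1, g2, e3, e4]
  · have i1 := pvIndex?_idxOf friends g hgm
    have i2 := pvIndex?_idxOf friends r hrm
    rw [PySem.List.index?_eq_idxOf?] at i1 i2
    simp [pvStepB, hs, i1, i2, ← ha_def, ← hb_def]
  · simp [hlen]
  · intro row' hr'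
    rcases List.mem_or_eq_of_mem_set hr' with hmem | heq
    · exact hrows _ hmem
    · subst heq; simp [hrowlen]
  · intro i j hi hj
    have hcnt : ((ps ++ [((a : Int), (b : Int))]).count ((i : Int), (j : Int)) : Int) =
        (ps.count ((i : Int), (j : Int)) : Int) + (if i = a ∧ j = b then 1 else 0) := by
      rw [List.count_append]
      push_cast
      congr 1
      by_cases hcase : i = a ∧ j = b
      · obtain ⟨hc1, hc2⟩ := hcase
        subst hc1; subst hc2
        simp
      · have hne2 : ¬ (((i : Int), (j : Int)) = (((a : Nat) : Int), ((b : Nat) : Int))) := by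
          intro hcon
          rw [Prod.ext_iff] at hcon
          simp only [Nat.cast_inj] at hcon
          exact hcase hcon
        simp only [List.count_singleton, beq_iff_eq]
        rw [if_neg (fun hc => hne2 hc.symm), if_neg hcase]; simp
    rw [hcnt]
    by_cases hia : i = a
    · subst hia
      have hlt : a < (m.set a (m[a].set b (m[a][b] + 1))).length := by simpa using ham
      have hset : (m.set a (m[a].set b (m[a][b] + 1))).getD a [] = m[a].set b (m[a][b] + 1) := by
        rw [List.getD_eq_getElem?_getD, List.getElem?_eq_getElem hlt, Option.getD_some,
          List.getElem_set_self]
      rw [hset]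
      have hv : m[a][b] = (ps.count ((a : Int), (b : Int)) : Int) := by
        rw [← pvGetD2 m a b ham hbm]; exact hpt a b han hbn
      by_cases hjb : j = b
      · subst hjb
        have hjl : b < (m[a].set b (m[a][b] + 1)).length := by simpa using hbm
        rw [List.getD_eq_getElem?_getD, List.getElem?_eq_getElem hjl, Option.getD_some,
          List.getElem_set_self, if_pos ⟨rfl, rfl⟩, hv]
      · rw [if_neg (fun hc => hjb hc.2)]
        have hrw : (m[a].set b (m[a][b] + 1)).getD j 0 = m[a].getD j 0 := by
          rw [List.getD_eq_getElem?_getD, List.getElem?_set_ne (by omega),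
            ← List.getD_eq_getElem?_getD]
        rw [hrw]
        have hmi : m.getD a [] = m[a] := by
          rw [List.getD_eq_getElem?_getD, List.getElem?_eq_getElem ham, Option.getD_some]
        have := hpt a j han hj
        rw [hmi] at this
        rw [this]
        ring
    · rw [if_neg (fun hc => hia hc.1), ← hpt i j hi hj]
      have : (m.set a (m[a].set b (m[a][b] + 1))).getD i [] = m.getD i [] := by
        rw [List.getD_eq_getElem?_getD, List.getElem?_set_ne (by omega),
          ← List.getD_eq_getElem?_getD]
      rw [this]
      ring

theorem pvFold_inv (friends : List String) :
    ∀ (gifts : List String),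
    (gifts.all (fun record =>
      match PySem.Str.split₀ record with
      | [g, r] => friends.contains g && friends.contains r
      | _ => false)) = true →
    (gifts.any (fun record =>
      match PySem.Str.split₀ record with
      | [g, r] => 2 ≤ friends.count g || 2 ≤ friends.count r
      | _ => false)) = false →
    ∀ (ps : List (Int × Int)) (m : List (List Int)), pvInv friends ps m →
    ∃ m' ps', gifts.foldl (pvStepA (pvNameIndex friends)) (some m) = some m' ∧
      gifts.foldl (pvStepB friends) (some ps) = some ps' ∧ pvInv friends ps' m' := by
  intro gifts
  induction gifts with
  | nil => intro _ _ ps m h; exact ⟨m, ps, rfl, rfl, h⟩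
  | cons record rest ih =>
    intro hpre hnd ps m h
    simp only [List.all_cons, Bool.and_eq_true] at hpre
    obtain ⟨h1, h2⟩ := hpre
    simp only [List.any_cons, Bool.or_eq_false_iff] at hnd
    obtain ⟨hd1, hd2⟩ := hnd
    rcases hsp : PySem.Str.split₀ record with _ | ⟨g, _ | ⟨r, _ | ⟨x, tl⟩⟩⟩ <;>
      rw [hsp] at h1 hd1 <;> simp only [Bool.and_eq_true] at h1
    case nil => exact absurd h1 (by simp)
    case cons.nil => exact absurd h1 (by simp)
    case cons.cons.cons => exact absurd h1 (by simp)
    obtain ⟨hgm, hrm⟩ := h1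
    simp only [Bool.or_eq_false_iff, decide_eq_false_iff_not, not_le] at hd1
    have hg1 : friends.count g = 1 := by
      have : 1 ≤ friends.count g := List.count_pos_iff.mpr (by simpa using hgm)
      omega
    have hr1 : friends.count r = 1 := by
      have : 1 ≤ friends.count r := List.count_pos_iff.mpr (by simpa using hrm)
      omega
    obtain ⟨m', e1, eB, hinv⟩ := pvStep_inv friends record g r hsp hg1 hr1 ps m h
    simp only [List.foldl_cons, e1, eB]
    exact ih h2 hd2 _ m' hinv

theorem pvInv_init (friends : List String) :
    pvInv friends []
      ((List.range friends.length).map (fun _ => List.replicate friends.length (0 : Int))) := by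
  refine ⟨by simp, ?_, ?_⟩
  · intro row hr
    simp only [List.mem_map] at hr
    obtain ⟨_, _, hrow⟩ := hr
    simp [← hrow]
  · intro i j hi hj
    have hrow : (List.map (fun _ => List.replicate friends.length (0 : Int))
        (List.range friends.length)).getD i [] = List.replicate friends.length 0 := by
      rw [List.getD_eq_getElem?_getD, List.getElem?_map, List.getElem?_range hi]
      rfl
    rw [hrow, List.getD_eq_getElem?_getD,
      List.getElem?_eq_getElem (by simpa using hj), Option.getD_some, List.getElem_replicate]
    simp

theorem pvInv_read (friends : List String) (pairs : List (Int × Int)) (m : List (List Int))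
    (h : pvInv friends pairs m) :
    m = (PySem.List.pyRange 0 friends.length 1).map (fun i =>
          (PySem.List.pyRange 0 friends.length 1).map (fun j => (pairs.count (i, j) : Int))) := by
  obtain ⟨hlen, hrows, hpt⟩ := h
  have hlr : (PySem.List.pyRange 0 (friends.length : Int) 1).length = friends.length := by
    rw [PySem.List.length_pyRange_one]; omega
  apply List.ext_getElem
  · simp [hlen, hlr]
  · intro i h1 h2
    have hi : i < friends.length := by omega
    rw [List.getElem_map]
    have hrl : m[i].length = friends.length := hrows _ (List.getElem_mem h1)
    apply List.ext_getElem
    · simp [hrl, hlr]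
    · intro j hj1 hj2
      have hj : j < friends.length := by omega
      rw [List.getElem_map]
      have e1 : (PySem.List.pyRange 0 (friends.length : Int) 1)[i] = (i : Int) := by
        rw [PySem.List.getElem_pyRange_one]; omega
      have e2 : (PySem.List.pyRange 0 (friends.length : Int) 1)[j] = (j : Int) := by
        rw [PySem.List.getElem_pyRange_one]; omega
      simp only [e1, e2]
      rw [← pvGetD2 m i j h1 hj1, hpt i j hi hj]

-- ===== VERDICT (by name: the statement is the Claim_ definition above) =====
theorem get_gift_status_spec : Claim_equal_get_gift_status := by
  intro friends gifts _ hpre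
  unfold Pre_get_gift_status at hpre
  obtain ⟨hpre, hnd⟩ := hpre
  unfold Spec_get_gift_status get_gift_status get_gift_status_alt
  obtain ⟨m', ps', hA, hB, hinv⟩ :=
    pvFold_inv friends gifts hpre hnd [] _ (pvInv_init friends)
  simp only [hA, hB, Option.getD_some]
  exact pvInv_read _ _ _ hinv
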